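-- pv_equiv track=rewrite | github.com/TorySciacca/TabToNote | TabToNote.py | guitarStringScaleCreator
-- ===== SOURCE A (Python) =====
-- westernScale = ['C','C#','D','D#','E','F','F#','G','G#','A','A#','B']
--
-- def guitarStringScaleCreator(note):
--     """Generates an interable scale from an input of a note
--     and starts the scale from the input"""
--     initalNote = westernScale.index(note.upper())
--     string = []
--     for i in westernScale:
--         convertedNote = (westernScale.index(i)+initalNote)
--         if convertedNote < 12:
--             string.append(westernScale[convertedNote])
--         if convertedNote >= 12 and convertedNote <= 24:
--             string.append(westernScale[convertedNote-12])
--     return string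
-- ===== SOURCE B (Python) =====
-- westernScale = ['C','C#','D','D#','E','F','F#','G','G#','A','A#','B']
--
-- def guitarStringScaleCreator(note):
--     """Generates an interable scale from an input of a note
--     and starts the scale from the input"""
--     i = westernScale.index(note.upper())
--     return westernScale[i:] + westernScale[:i]
-- ===== Notes on version B (the rewrite author's own statement) =====
-- stated objective: simpler
-- what changed: Replaced the 12-iteration loop with repeated list.index scans and two wraparound branches by computing the start index once and returning the rotation as a slice concatenation westernScale[i:] + westernScale[:i].
import Mathlib
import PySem

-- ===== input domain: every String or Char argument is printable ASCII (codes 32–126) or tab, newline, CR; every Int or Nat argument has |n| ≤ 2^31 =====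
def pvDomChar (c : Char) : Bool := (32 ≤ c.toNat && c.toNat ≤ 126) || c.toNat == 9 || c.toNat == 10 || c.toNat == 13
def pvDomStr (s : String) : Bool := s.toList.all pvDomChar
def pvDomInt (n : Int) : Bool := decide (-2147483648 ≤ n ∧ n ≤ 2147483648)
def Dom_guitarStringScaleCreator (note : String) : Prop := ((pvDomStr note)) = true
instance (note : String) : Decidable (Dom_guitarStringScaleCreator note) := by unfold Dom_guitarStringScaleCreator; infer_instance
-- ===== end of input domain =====

-- B replaces A's 12-iteration loop (repeated .index scans, wraparound branches) by one
-- index computation and a slice-concatenation rotation; objective: simpler.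

-- ===== PORT A =====
def westernScale : List String := ["C","C#","D","D#","E","F","F#","G","G#","A","A#","B"]

-- literal port of A: the inner index? is always some (i ranges over westernScale) and the
-- indexings are always in range (convertedNote < 12 resp. convertedNote-12 < 12), so the
-- getD defaults are never used; exact on Pre_.
def guitarStringScaleCreator (note : String) : List String :=
  let initalNote := (PySem.List.index? westernScale (PySem.Str.upper note)).getD 0
  westernScale.foldl (fun string i =>
    let convertedNote := (PySem.List.index? westernScale i).getD 0 + initalNote
    let string := if convertedNote < 12 then
        string ++ [(PySem.List.pyGet? westernScale (convertedNote : Int)).getD ""] else string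
    if convertedNote >= 12 && convertedNote <= 24 then
        string ++ [(PySem.List.pyGet? westernScale ((convertedNote : Int) - 12)).getD ""] else string) []

-- ===== PORT B =====
def guitarStringScaleCreator_alt (note : String) : List String :=
  let i := (PySem.List.index? westernScale (PySem.Str.upper note)).getD 0
  PySem.List.slice westernScale (some (i : Int)) none ++
    PySem.List.slice westernScale none (some (i : Int))

-- ===== PRECONDITION & SPEC =====
-- Pre_: A (and B) raise ValueError when note.upper() is not one of the 12 scale names.
def Pre_guitarStringScaleCreator (note : String) : Prop :=
  PySem.Str.upper note ∈ westernScale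
instance (note : String) : Decidable (Pre_guitarStringScaleCreator note) := by
  unfold Pre_guitarStringScaleCreator; infer_instance
def pvWitness_guitarStringScaleCreator : String := "g#"

def Spec_guitarStringScaleCreator (note : String) (out : List String) : Prop := out = guitarStringScaleCreator_alt note
instance (note : String) (out : List String) : Decidable (Spec_guitarStringScaleCreator note out) := by unfold Spec_guitarStringScaleCreator; infer_instance

-- ===== CLAIM (what is proved, stated in full; the proofs are below) =====
def Claim_equal_guitarStringScaleCreator : Prop := ∀ (note : String), Dom_guitarStringScaleCreator note → Pre_guitarStringScaleCreator note → Spec_guitarStringScaleCreator note (guitarStringScaleCreator note)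

-- ===== LEMMAS AND PROOFS =====
lemma both_eq_of_upper (note : String) (u : String) (hu : PySem.Str.upper note = u)
    (h : u ∈ westernScale) :
    guitarStringScaleCreator note = guitarStringScaleCreator_alt note := by
  unfold guitarStringScaleCreator guitarStringScaleCreator_alt
  rw [hu]
  simp only [westernScale, List.mem_cons, List.not_mem_nil, or_false] at h
  rcases h with h|h|h|h|h|h|h|h|h|h|h|h <;> subst h <;> decide

-- ===== VERDICT (by name: the statement is the Claim_ definition above) =====
theorem guitarStringScaleCreator_spec : Claim_equal_guitarStringScaleCreator := by
  intro note _ hpre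
  unfold Spec_guitarStringScaleCreator
  exact both_eq_of_upper note _ rfl hpre
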